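-- pv_equiv track=rewrite | github.com/JIHYEOK0801/study | Algorithm/python/프로그래머스 레벨3/외벽 점검.py | check
-- ===== SOURCE A (Python) =====
-- from collections import deque
--
-- def check(arrange, weak, n):
--     weak_plusN = []
--     for w in weak:
--         weak_plusN.append(w + n)
--
--     for i in range(len(weak)):
--         new_weak = deque(weak[i:] + weak_plusN[:i])
--         for distance in arrange:
--             count = 0
--             for j in range(len(new_weak)):
--                 if new_weak[j] <= new_weak[0] + distance:
--                     count += 1
--                 else:
--                     break
--             for c in range(count):
--                 new_weak.popleft()
--         if not new_weak:
--             return len(arrange)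
--
--     return -1
-- ===== SOURCE B (Python) =====
-- def check(arrange, weak, n):
--     W = len(weak)
--     for i in range(W):
--         linear = weak[i:] + [w + n for w in weak[:i]]
--         idx = 0
--         for distance in arrange:
--             if idx < W:
--                 reach = linear[idx] + distance
--                 while idx < W and linear[idx] <= reach:
--                     idx += 1
--         if idx >= W:
--             return len(arrange)
--     return -1
-- ===== Notes on version B (the rewrite author's own statement) =====
-- stated objective: simpler
-- what changed: Replaces the deque with its per-friend count-prefix-then-popleft-loop pair by an immutable linearized list and a single integer pointer advanced with one while loop; no container is ever mutated or rebuilt.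
import Mathlib
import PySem

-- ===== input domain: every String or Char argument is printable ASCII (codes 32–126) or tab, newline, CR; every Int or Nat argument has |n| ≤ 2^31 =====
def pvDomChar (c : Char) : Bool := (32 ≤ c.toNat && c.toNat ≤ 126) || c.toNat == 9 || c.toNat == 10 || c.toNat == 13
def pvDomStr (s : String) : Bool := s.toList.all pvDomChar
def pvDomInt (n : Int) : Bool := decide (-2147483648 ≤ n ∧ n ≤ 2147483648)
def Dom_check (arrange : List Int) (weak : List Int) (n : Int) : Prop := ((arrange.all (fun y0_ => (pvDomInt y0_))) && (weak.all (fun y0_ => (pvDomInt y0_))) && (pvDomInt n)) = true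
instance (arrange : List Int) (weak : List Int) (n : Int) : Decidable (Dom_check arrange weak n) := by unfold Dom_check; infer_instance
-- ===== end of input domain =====

-- B replaces A's deque (per-friend prefix count + popleft loop) by a fixed linearized list and a single advancing integer pointer; objective: simpler.

-- ===== PORT A =====
-- inner `for j in range(len(new_weak)) ... break` loop: counts the prefix with value ≤ bound
def prefixCount (bound : Int) : List Int → Nat
  | [] => 0
  | x :: xs => if x ≤ bound then prefixCount bound xs + 1 else 0

-- the whole count computation for one friend (bound = new_weak[0] + distance; empty deque counts 0)
def acount (nw : List Int) (dist : Int) : Nat :=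
  match nw with
  | [] => 0
  | h :: _ => prefixCount (h + dist) nw

-- the `for distance in arrange` loop; `popleft` count times = drop count
def afold (arrange : List Int) (nw : List Int) : List Int :=
  arrange.foldl (fun nw d => nw.drop (acount nw d)) nw

-- the `for i in range(len(weak))` loop with its early return
def aouter (arrange weak weak_plusN : List Int) : List Nat → Int
  | [] => -1
  | i :: rest =>
      let nw := afold arrange (weak.drop i ++ weak_plusN.take i)
      if nw = [] then (arrange.length : Int) else aouter arrange weak weak_plusN rest

def check (arrange : List Int) (weak : List Int) (n : Int) : Int :=
  let weak_plusN := weak.foldl (fun acc w => acc ++ [w + n]) []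
  aouter arrange weak weak_plusN (List.range weak.length)

-- ===== PORT B =====
-- `while idx < W and linear[idx] <= reach: idx += 1`
def advance (linear : List Int) (W : Nat) (reach : Int) (idx : Nat) : Nat :=
  if h : idx < W ∧ linear.getD idx 0 ≤ reach then advance linear W reach (idx + 1) else idx
termination_by W - idx
decreasing_by omega

-- the `for distance in arrange` loop over the pointer
def bfriends (linear : List Int) (W : Nat) (arrange : List Int) : Nat :=
  arrange.foldl
    (fun idx d => if idx < W then advance linear W (linear.getD idx 0 + d) idx else idx) 0

-- the `for i in range(W)` loop with its early return
def bouter (arrange weak : List Int) (n : Int) (W : Nat) : List Nat → Int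
  | [] => -1
  | i :: rest =>
      let linear := weak.drop i ++ (weak.take i).map (fun w => w + n)
      let idx := bfriends linear W arrange
      if W ≤ idx then (arrange.length : Int) else bouter arrange weak n W rest

def check_alt (arrange : List Int) (weak : List Int) (n : Int) : Int :=
  bouter arrange weak n weak.length (List.range weak.length)

-- ===== PRECONDITION & SPEC =====
def Spec_check (arrange : List Int) (weak : List Int) (n : Int) (out : Int) : Prop := out = check_alt arrange weak n
instance (arrange : List Int) (weak : List Int) (n : Int) (out : Int) : Decidable (Spec_check arrange weak n out) := by unfold Spec_check; infer_instance

-- ===== CLAIM (what is proved, stated in full; the proofs are below) =====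
def Claim_equal_check : Prop := ∀ (arrange : List Int) (weak : List Int) (n : Int), Dom_check arrange weak n → Spec_check arrange weak n (check arrange weak n)

-- ===== LEMMAS AND PROOFS =====

theorem prefixCount_le_length (bound : Int) (l : List Int) : prefixCount bound l ≤ l.length := by
  induction l with
  | nil => simp [prefixCount]
  | cons x xs ih => simp only [prefixCount, List.length_cons]; split <;> omega

theorem foldl_append_map (f : Int → Int) (l : List Int) (acc : List Int) :
    l.foldl (fun a w => a ++ [f w]) acc = acc ++ l.map f := by
  induction l generalizing acc with
  | nil => simp
  | cons x xs ih => simp [List.foldl_cons, ih]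

theorem advance_eq (linear : List Int) (reach : Int) (idx : Nat) (h : idx ≤ linear.length) :
    advance linear linear.length reach idx = idx + prefixCount reach (linear.drop idx) := by
  rw [advance]
  by_cases hlt : idx < linear.length
  · have hget : linear.getD idx 0 = linear[idx] := List.getD_eq_getElem linear 0 hlt
    rw [List.drop_eq_getElem_cons hlt]
    by_cases hle : linear[idx] ≤ reach
    · rw [dif_pos ⟨hlt, by rw [hget]; exact hle⟩,
        advance_eq linear reach (idx + 1) (by omega)]
      simp only [prefixCount, if_pos hle]
      omega
    · rw [dif_neg (by rw [hget]; tauto)]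
      simp [prefixCount, hle]
  · rw [dif_neg (by tauto)]
    have hidx : idx = linear.length := by omega
    simp [hidx, prefixCount]
termination_by linear.length - idx
decreasing_by omega

theorem step_eq (linear : List Int) (d : Int) (idx : Nat) (h : idx ≤ linear.length) :
    (linear.drop idx).drop (acount (linear.drop idx) d)
      = linear.drop ((if idx < linear.length then advance linear linear.length (linear.getD idx 0 + d) idx else idx))
    ∧ (if idx < linear.length then advance linear linear.length (linear.getD idx 0 + d) idx else idx) ≤ linear.length := by
  by_cases hlt : idx < linear.length
  · have hget : linear.getD idx 0 = linear[idx] := List.getD_eq_getElem linear 0 hlt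
    have hcons : linear.drop idx = linear[idx] :: linear.drop (idx + 1) := List.drop_eq_getElem_cons hlt
    have hadv := advance_eq linear (linear.getD idx 0 + d) idx h
    have hcnt : acount (linear.drop idx) d = prefixCount (linear.getD idx 0 + d) (linear.drop idx) := by
      rw [hget, hcons]
      rfl
    have hpc := prefixCount_le_length (linear.getD idx 0 + d) (linear.drop idx)
    have hlen : (linear.drop idx).length = linear.length - idx := List.length_drop ..
    refine ⟨?_, ?_⟩
    · rw [if_pos hlt, hadv, hcnt, List.drop_drop]
    · rw [if_pos hlt, hadv]
      omega
  · have hidx : idx = linear.length := by omega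
    simp [hidx, acount]

theorem fold_eq (arrange linear : List Int) (idx : Nat) (h : idx ≤ linear.length) :
    afold arrange (linear.drop idx)
      = linear.drop (arrange.foldl (fun idx d => if idx < linear.length then advance linear linear.length (linear.getD idx 0 + d) idx else idx) idx)
    ∧ arrange.foldl (fun idx d => if idx < linear.length then advance linear linear.length (linear.getD idx 0 + d) idx else idx) idx ≤ linear.length := by
  induction arrange generalizing idx with
  | nil => simpa [afold] using h
  | cons d rest ih =>
      obtain ⟨h1, h2⟩ := step_eq linear d idx h
      have := ih _ h2
      simp only [afold, List.foldl_cons] at *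
      rw [h1]
      exact this

theorem outer_eq (arrange weak : List Int) (n : Int) (l : List Nat)
    (hl : ∀ i ∈ l, i ≤ weak.length) :
    aouter arrange weak (weak.map (fun w => w + n)) l = bouter arrange weak n weak.length l := by
  induction l with
  | nil => rfl
  | cons i rest ih =>
      have hi : i ≤ weak.length := hl i (by simp)
      have hsame : weak.drop i ++ (weak.map (fun w => w + n)).take i
          = weak.drop i ++ (weak.take i).map (fun w => w + n) := by
        rw [List.map_take]
      have hW : (weak.drop i ++ (weak.take i).map (fun w => w + n)).length = weak.length := by
        simp
        omega
      obtain ⟨h1, h2⟩ :=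
        fold_eq arrange (weak.drop i ++ (weak.take i).map (fun w => w + n)) 0 (by omega)
      simp only [List.drop_zero] at h1
      rw [hW] at h1
      simp only [aouter, bouter, bfriends, hsame, h1, List.drop_eq_nil_iff, hW]
      split_ifs with hc
      · rfl
      · exact ih (fun j hj => hl j (List.mem_cons_of_mem _ hj))

-- ===== VERDICT (by name: the statement is the Claim_ definition above) =====
theorem check_spec : Claim_equal_check := by
  intro arrange weak n _
  unfold Spec_check check check_alt
  rw [foldl_append_map]
  simp only [List.nil_append]
  exact outer_eq arrange weak n (List.range weak.length)
    (fun i hi => le_of_lt (List.mem_range.mp hi))
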